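-- pv_equiv track=rewrite | github.com/thisfren/desloppiflutter | desloppify/languages/rust/detectors/_shared.py | _argument_count
-- ===== SOURCE A (Python) =====
-- def _find_matching_delimiter(text: str, start_index: int, opening: str, closing: str) -> int | None:
--     depth = 0
--     for index in range(start_index, len(text)):
--         char = text[index]
--         if char == opening:
--             depth += 1
--         elif char == closing:
--             depth -= 1
--             if depth == 0:
--                 return index
--     return None
--
-- def _argument_count(signature: str) -> int:
--     open_index = signature.find("(")
--     if open_index == -1:
--         return 0
--     close_index = _find_matching_delimiter(signature, open_index, "(", ")")
--     if close_index is None: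
--         return 0
--     params = [chunk.strip() for chunk in signature[open_index + 1 : close_index].split(",")]
--     return len([param for param in params if param])
-- ===== SOURCE B (Python) =====
-- def _argument_count(signature: str) -> int:
--     open_index = signature.find("(")
--     if open_index == -1:
--         return 0
--     depth = 1
--     seen = False  # current comma-delimited segment contains a non-whitespace char
--     count = 0
--     for char in signature[open_index + 1:]:
--         if char == ")":
--             if depth == 1:
--                 return count + (1 if seen else 0)
--             depth -= 1
--             seen = True
--         elif char == "(":
--             depth += 1
--             seen = True
--         elif char == ",":
--             if seen:
--                 count += 1
--             seen = False
--         elif not char.isspace():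
--             seen = True
--     return 0
-- ===== Notes on version B (the rewrite author's own statement) =====
-- stated objective: alternative
-- what changed: Replaces the find-matching-delimiter helper plus slice/split/strip/filter pipeline by a single left-to-right scan that tracks paren depth and a has-non-whitespace flag per comma segment, counting segments on the fly.
import Mathlib
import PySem

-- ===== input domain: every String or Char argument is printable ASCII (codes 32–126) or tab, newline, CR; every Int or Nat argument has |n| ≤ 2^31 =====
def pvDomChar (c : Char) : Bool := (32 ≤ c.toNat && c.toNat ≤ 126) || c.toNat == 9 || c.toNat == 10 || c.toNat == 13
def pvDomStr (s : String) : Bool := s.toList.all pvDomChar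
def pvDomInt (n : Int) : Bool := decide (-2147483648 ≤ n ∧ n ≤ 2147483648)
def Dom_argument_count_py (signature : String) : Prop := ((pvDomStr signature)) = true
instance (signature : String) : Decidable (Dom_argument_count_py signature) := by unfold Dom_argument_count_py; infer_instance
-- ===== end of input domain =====

-- B replaces A's matching-delimiter helper and slice/split/strip pipeline by one depth-tracking scan; alternative decomposition, same cost.

-- ===== PORT A =====
-- _find_matching_delimiter specialised to the call: walks text[index] for index in range(start, len(text));
-- ported as structural recursion on the remaining suffix, idx the current python index, depth as in the loop.
def pvFmGo : List Char → Nat → Int → Option Nat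
  | [], _, _ => none
  | c :: rest, idx, depth =>
    if c = '(' then pvFmGo rest (idx + 1) (depth + 1)
    else if c = ')' then
      (if depth - 1 = 0 then some idx else pvFmGo rest (idx + 1) (depth - 1))
    else pvFmGo rest (idx + 1) depth

def argument_count_py (signature : String) : Int :=
  let s := signature.toList
  let open_index := PySem.Chars.find s ['(']
  if open_index = -1 then 0
  else
    match pvFmGo (s.drop open_index.toNat) open_index.toNat 0 with
    | none => 0
    | some close_index =>
      let params := (PySem.Chars.splitOn
          (PySem.List.slice s (some (open_index + 1)) (some (close_index : Int))) [',']).map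
          PySem.Chars.strip
      ((params.filter (fun p => p ≠ [])).length : Int)

-- ===== PORT B =====
-- Source B's for-loop over signature[open_index+1:] with state (depth, seen, count).
def pvBGo : List Char → Int → Bool → Int → Int
  | [], _, _, _ => 0
  | c :: rest, depth, seen, count =>
    if c = ')' then
      if depth = 1 then count + (if seen then 1 else 0)
      else pvBGo rest (depth - 1) true count
    else if c = '(' then pvBGo rest (depth + 1) true count
    else if c = ',' then pvBGo rest depth false (count + (if seen then 1 else 0))
    else if PySem.Chars.isspace c then pvBGo rest depth seen count
    else pvBGo rest depth true count

def argument_count_py_alt (signature : String) : Int :=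
  let s := signature.toList
  let open_index := PySem.Chars.find s ['(']
  if open_index = -1 then 0
  else pvBGo (s.drop (open_index.toNat + 1)) 1 false 0

-- ===== PRECONDITION & SPEC =====
def Spec_argument_count_py (signature : String) (out : Int) : Prop := out = argument_count_py_alt signature
instance (signature : String) (out : Int) : Decidable (Spec_argument_count_py signature out) := by unfold Spec_argument_count_py; infer_instance

-- ===== CLAIM (what is proved, stated in full; the proofs are below) =====
def Claim_equal_argument_count_py : Prop := ∀ (signature : String), Dom_argument_count_py signature → Spec_argument_count_py signature (argument_count_py signature)

-- ===== LEMMAS AND PROOFS =====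

-- the characters strictly between the outer '(' (already consumed; current depth d) and its matching ')'
def pvInner : List Char → Int → Option (List Char)
  | [], _ => none
  | c :: rest, d =>
    if c = '(' then (pvInner rest (d + 1)).map (c :: ·)
    else if c = ')' then
      (if d - 1 = 0 then some [] else (pvInner rest (d - 1)).map (c :: ·))
    else (pvInner rest d).map (c :: ·)

-- number of comma-separated segments of u with non-whitespace content, seen = current segment already non-blank
def pvSegCount : List Char → Bool → Int
  | [], seen => if seen then 1 else 0
  | c :: rest, seen =>
    if c = ',' then (if seen then 1 else 0) + pvSegCount rest false
    else if PySem.Chars.isspace c then pvSegCount rest seen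
    else pvSegCount rest true

-- structural version of str.split(",")
def pvSplitC : List Char → List (List Char)
  | [] => [[]]
  | c :: rest =>
    if c = ',' then [] :: pvSplitC rest
    else (c :: (pvSplitC rest).headI) :: (pvSplitC rest).tail

theorem pvSplitC_ne_nil (u : List Char) : pvSplitC u ≠ [] := by
  cases u with
  | nil => simp [pvSplitC]
  | cons c rest => simp only [pvSplitC]; split <;> simp

theorem pvFmGo_eq_inner (t : List Char) : ∀ (idx : Nat) (d : Int),
    pvFmGo t idx d = (pvInner t d).map (fun u => idx + u.length) := by
  induction t with
  | nil => intro idx d; rfl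
  | cons c rest ih =>
    intro idx d
    simp only [pvFmGo, pvInner]
    by_cases h1 : c = '('
    · simp only [h1, if_pos rfl, ih, Option.map_map]
      cases pvInner rest (d + 1) <;> simp <;> omega
    · by_cases h2 : c = ')'
      · simp only [h1, h2, if_neg, if_pos rfl, reduceCtorEq]
        by_cases h3 : d - 1 = 0
        · simp [h3]
        · simp only [if_neg h3, ih, Option.map_map]
          cases pvInner rest (d - 1) <;> simp <;> omega
      · simp only [if_neg h1, if_neg h2, ih, Option.map_map]
        cases pvInner rest d <;> simp <;> omega

theorem pvInner_prefix (t : List Char) : ∀ (d : Int) (u : List Char),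
    pvInner t d = some u → u <+: t := by
  induction t with
  | nil => intro d u h; simp [pvInner] at h
  | cons c rest ih =>
    intro d u h
    simp only [pvInner] at h
    split at h
    · rcases Option.map_eq_some_iff.mp h with ⟨v, hv, rfl⟩
      exact List.cons_prefix_cons.mpr ⟨rfl, ih _ v hv⟩
    · split at h
      · split at h
        · cases h; exact List.nil_prefix
        · rcases Option.map_eq_some_iff.mp h with ⟨v, hv, rfl⟩
          exact List.cons_prefix_cons.mpr ⟨rfl, ih _ v hv⟩
      · rcases Option.map_eq_some_iff.mp h with ⟨v, hv, rfl⟩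
        exact List.cons_prefix_cons.mpr ⟨rfl, ih _ v hv⟩

theorem pvBGo_eq_inner (t : List Char) : ∀ (d : Int) (seen : Bool) (count : Int),
    pvBGo t d seen count =
      (match pvInner t d with
       | none => 0
       | some u => count + pvSegCount u seen) := by
  induction t with
  | nil => intro d seen count; rfl
  | cons c rest ih =>
    intro d seen count
    simp only [pvBGo, pvInner]
    by_cases h2 : c = ')'
    · have h1 : ¬ c = '(' := by simp [h2]
      simp only [if_pos h2, if_neg h1]
      by_cases h3 : d = 1
      · have : d - 1 = 0 := by omega
        simp [h3, this, pvSegCount]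
      · have : ¬ d - 1 = 0 := by omega
        simp only [if_neg h3, if_neg this, ih]
        cases pvInner rest (d - 1) with
        | none => rfl
        | some u =>
          have hc : ¬ (')' = ',') := by decide
          have hs : ¬ PySem.Chars.isspace ')' = true := by decide
          simp [h2, pvSegCount, hc, hs]
    · by_cases h1 : c = '('
      · simp only [if_pos h1, if_neg h2, ih]
        cases pvInner rest (d + 1) with
        | none => rfl
        | some u =>
          have hc : ¬ ('(' = ',') := by decide
          have hs : ¬ PySem.Chars.isspace '(' = true := by decide
          simp [h1, pvSegCount, hc, hs]
      · simp only [if_neg h1, if_neg h2]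
        by_cases h4 : c = ','
        · simp only [if_pos h4, ih]
          cases pvInner rest d with
          | none => rfl
          | some u => simp [h4, pvSegCount]; ring
        · by_cases h5 : PySem.Chars.isspace c = true
          · simp only [if_neg h4, if_pos h5, ih]
            cases pvInner rest d with
            | none => rfl
            | some u => simp [pvSegCount, h4, h5]
          · simp only [if_neg h4, if_neg h5, ih]
            cases pvInner rest d with
            | none => rfl
            | some u => simp [pvSegCount, h4, h5]

theorem pvSplitOn_go_eq (fuel : Nat) : ∀ (l cur : List Char) (acc : List (List Char)),
    l.length < fuel →
    PySem.Chars.splitOn.go [','] fuel l cur acc =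
      acc.reverse ++ (pvSplitC l).modifyHead (cur.reverse ++ ·) := by
  induction fuel with
  | zero => intro l cur acc h; omega
  | succ fuel ih =>
    intro l cur acc h
    cases l with
    | nil => simp [PySem.Chars.splitOn.go, pvSplitC]
    | cons c rest =>
      by_cases hc : c = ','
      · have hpre : List.isPrefixOf [','] (c :: rest) = true := by
          simp [List.isPrefixOf, hc]
        rw [PySem.Chars.splitOn.go]
        have := ih rest [] (cur.reverse :: acc) (by simpa using Nat.lt_of_succ_lt_succ h)
        simp only [hpre, if_true, List.length_nil, List.length_singleton, List.length_cons,
          List.drop_succ_cons, List.drop_zero, List.drop] 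
        rw [this]
        rcases hne : pvSplitC rest with _ | ⟨p, ps⟩
        · exact absurd hne (pvSplitC_ne_nil rest)
        · simp [pvSplitC, hc, hne]
      · have hpre : List.isPrefixOf [','] (c :: rest) = false := by
          simp [List.isPrefixOf]; exact fun h' => hc h'.symm
        rw [PySem.Chars.splitOn.go]
        simp only [hpre, Bool.false_eq_true, if_false]
        have := ih rest (c :: cur) acc (by simpa using Nat.lt_of_succ_lt_succ h)
        rw [this]
        rcases hne : pvSplitC rest with _ | ⟨p, ps⟩
        · exact absurd hne (pvSplitC_ne_nil rest)
        · simp [pvSplitC, hc, hne]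

theorem pvSplitOn_eq_splitC (u : List Char) :
    PySem.Chars.splitOn u [','] = pvSplitC u := by
  unfold PySem.Chars.splitOn
  rw [pvSplitOn_go_eq (u.length + 1) u [] [] (by omega)]
  rcases hne : pvSplitC u with _ | ⟨p, ps⟩
  · exact absurd hne (pvSplitC_ne_nil u)
  · simp

theorem pvStrip_cons_space (c : Char) (p : List Char) (h : PySem.Chars.isspace c = true) :
    PySem.Chars.strip (c :: p) = PySem.Chars.strip p := by
  simp [PySem.Chars.strip, PySem.Chars.lstrip, List.dropWhile_cons, h]

theorem pvStrip_cons_ne_nil (c : Char) (p : List Char) (h : ¬ PySem.Chars.isspace c = true) :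
    PySem.Chars.strip (c :: p) ≠ [] := by
  simp only [PySem.Chars.strip, PySem.Chars.lstrip, PySem.Chars.rstrip, List.dropWhile_cons, h,
    if_false, Bool.false_eq_true]
  intro hcon
  rw [List.reverse_eq_nil_iff, List.dropWhile_eq_nil_iff] at hcon
  exact h (hcon c (by simp))

theorem pvSegCount_eq_split (u : List Char) : ∀ (seen : Bool),
    pvSegCount u seen =
      (match pvSplitC u with
       | [] => 0
       | p :: ps =>
         (if seen = true ∨ PySem.Chars.strip p ≠ [] then (1 : Int) else 0) +
           (ps.countP (fun q => decide (PySem.Chars.strip q ≠ []))) ) := by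
  induction u with
  | nil =>
    intro seen
    cases seen <;> rfl
  | cons c rest ih =>
    intro seen
    by_cases hc : c = ','
    · have h1 : ¬ PySem.Chars.isspace c = true := by rw [hc]; decide
      simp only [pvSegCount, pvSplitC, if_pos hc, ih]
      rcases hne : pvSplitC rest with _ | ⟨p, ps⟩
      · exact absurd hne (pvSplitC_ne_nil rest)
      · have hnil : PySem.Chars.strip ([] : List Char) = [] := rfl
        simp only [hne, hnil, List.countP_cons]
        by_cases hp : PySem.Chars.strip p = [] <;>
          cases seen <;> simp [hp] <;> push_cast <;> ring
    · rcases hne : pvSplitC rest with _ | ⟨p, ps⟩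
      · exact absurd hne (pvSplitC_ne_nil rest)
      by_cases hs : PySem.Chars.isspace c = true
      · have hc' : ¬ c = ',' := hc
        simp only [pvSegCount, pvSplitC, if_neg hc', if_pos hs, ih, hne]
        simp [pvStrip_cons_space c p hs]
      · simp only [pvSegCount, pvSplitC, if_neg hc, if_neg hs, ih, hne]
        simp [pvStrip_cons_ne_nil c p hs]

theorem pv_filter_count (u : List Char) :
    ((((pvSplitC u).map PySem.Chars.strip).filter (fun p => p ≠ [])).length : Int) =
      pvSegCount u false := by
  rw [pvSegCount_eq_split u false]
  rcases hne : pvSplitC u with _ | ⟨p, ps⟩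
  · exact absurd hne (pvSplitC_ne_nil u)
  · have hmap : (List.filter (fun p => !decide (p = ([] : List Char)))
          (List.map PySem.Chars.strip ps)).length
        = List.countP (fun q => decide (¬ PySem.Chars.strip q = [])) ps := by
      rw [← List.countP_eq_length_filter, List.countP_map]
      simp [Function.comp_def]
    simp only [List.map_cons, List.filter_cons]
    by_cases hp : PySem.Chars.strip p = []
    · simp [hp, hmap]
    · simp [hp, hmap]
      push_cast
      ring

theorem pv_main (signature : String) :
    argument_count_py signature = argument_count_py_alt signature := by
  unfold argument_count_py argument_count_py_alt
  set s := signature.toList with hs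
  by_cases hfind : PySem.Chars.find s ['('] = -1
  · simp [hfind]
  · simp only [if_neg hfind]
    have hge : 0 ≤ PySem.Chars.find s ['('] := by
      have := PySem.Chars.neg_one_le_find s ['(']
      omega
    obtain ⟨hpre, -⟩ := PySem.Chars.find_spec (s := s) (sub := ['(']) hge
    set oi := (PySem.Chars.find s ['(']).toNat with hoi
    rcases hpre with ⟨t, ht⟩
    have hdrop1 : s.drop (oi + 1) = t := by
      rw [← List.tail_drop, ← ht]; rfl
    rw [← ht, hdrop1]
    simp only [List.singleton_append]
    have hfm : pvFmGo ('(' :: t) oi 0 = (pvInner t 1).map (fun u => oi + 1 + u.length) := by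
      rw [pvFmGo]
      simp only [if_pos rfl, zero_add, pvFmGo_eq_inner]
      cases pvInner t 1 <;> simp <;> omega
    rw [hfm, pvBGo_eq_inner]
    rcases hin : pvInner t 1 with _ | u
    · simp
    · simp only [Option.map_some]
      have hu : u <+: t := pvInner_prefix t 1 u hin
      have hslice : PySem.List.slice s (some (PySem.Chars.find s ['('] + 1))
          (some ((oi + 1 + u.length : Nat) : Int)) = u := by
        have h1 : PySem.Chars.find s ['('] + 1 = ((oi + 1 : Nat) : Int) := by
          simp [hoi]; omega
        have h2 : ((oi + 1 + u.length : Nat) : Int) = ((oi + 1 : Nat) : Int) + (u.length : Int) := by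
          push_cast; ring
        rw [h1, h2, PySem.List.slice_natCast_add, hdrop1, ← List.prefix_iff_eq_take.mp hu]
      rw [hslice, pvSplitOn_eq_splitC]
      rw [pv_filter_count]
      simp

-- ===== VERDICT (by name: the statement is the Claim_ definition above) =====
theorem argument_count_py_spec : Claim_equal_argument_count_py := by
  intro signature _
  unfold Spec_argument_count_py
  exact pv_main signature
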